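-- pv_equiv track=rewrite | github.com/scottlz0310/PhotoGeoView | tests/without_pillow_plan.py | _classify_technical_info
-- ===== SOURCE A (Python) =====
-- from typing import Dict, Optional, Tuple, List
--
-- def _classify_technical_info(exif_data: Dict) -> Dict:
--     """技術情報の分類"""
--     tech_info = {}
--
--     # 撮影設定
--     settings_mapping = {
--         'FNumber': 'aperture',
--         'ExposureTime': 'shutter_speed',
--         'ISOSpeedRatings': 'iso',
--         'FocalLength': 'focal_length',
--         'Flash': 'flash',
--         'WhiteBalance': 'white_balance',
--         'ExposureMode': 'exposure_mode'
--     }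
--
--     for exif_key, tech_key in settings_mapping.items():
--         for key, value in exif_data.items():
--             if exif_key in key:
--                 tech_info[tech_key] = value
--                 break
--
--     return tech_info
-- ===== SOURCE B (Python) =====
-- def _classify_technical_info(exif_data):
--     """技術情報の分類 — single pass over exif_data with a first-seen guard, then emit in mapping order"""
--     mapping = [('FNumber', 'aperture'), ('ExposureTime', 'shutter_speed'),
--                ('ISOSpeedRatings', 'iso'), ('FocalLength', 'focal_length'),
--                ('Flash', 'flash'), ('WhiteBalance', 'white_balance'),
--                ('ExposureMode', 'exposure_mode')]
--     found = {}
--     for key, value in exif_data.items():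
--         for exif_key, tech_key in mapping:
--             if exif_key in key and tech_key not in found:
--                 found[tech_key] = value
--     return {tech_key: found[tech_key] for _, tech_key in mapping if tech_key in found}
-- ===== Notes on version B (the rewrite author's own statement) =====
-- stated objective: alternative
-- what changed: B replaces A's seven independent full scans of exif_data (one per mapping entry, break on first hit) by a single scan of exif_data with a first-seen guard per tech key, followed by an emission pass over the 7-entry mapping that preserves A's insertion order exactly.
import Mathlib
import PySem

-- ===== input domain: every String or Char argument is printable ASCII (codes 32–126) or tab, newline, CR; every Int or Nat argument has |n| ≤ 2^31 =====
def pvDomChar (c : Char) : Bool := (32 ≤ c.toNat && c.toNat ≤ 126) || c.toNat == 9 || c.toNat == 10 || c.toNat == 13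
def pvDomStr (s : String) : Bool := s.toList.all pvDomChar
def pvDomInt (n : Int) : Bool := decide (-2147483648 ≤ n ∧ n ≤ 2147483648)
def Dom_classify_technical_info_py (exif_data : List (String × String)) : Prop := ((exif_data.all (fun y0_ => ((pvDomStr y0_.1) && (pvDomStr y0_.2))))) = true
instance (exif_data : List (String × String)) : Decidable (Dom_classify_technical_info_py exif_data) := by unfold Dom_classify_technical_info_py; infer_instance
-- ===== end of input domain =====

-- B replaces A's seven independent scans of exif_data by ONE scan with a first-seen
-- guard plus an emission pass over the 7-entry mapping (alternative decomposition,
-- same result); equivalence of the returned dict is proved including insertion order.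

-- ===== PORT A =====
-- the settings_mapping literal, in Python's insertion order (shared data constant)
def pvMapping : List (String × String) :=
  [("FNumber", "aperture"), ("ExposureTime", "shutter_speed"),
   ("ISOSpeedRatings", "iso"), ("FocalLength", "focal_length"),
   ("Flash", "flash"), ("WhiteBalance", "white_balance"),
   ("ExposureMode", "exposure_mode")]

-- A's inner loop: first exif item whose key contains exif_key sets tech_info[tech_key] and breaks
def pvAInner (ek tk : String) (tech : PySem.Dict String String) :
    List (String × String) → PySem.Dict String String
  | [] => tech
  | (k, v) :: rest =>
      if PySem.Str.isIn ek k then tech.insert tk v else pvAInner ek tk tech rest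

def classify_technical_info_py (exif_data : List (String × String)) : List (String × String) :=
  (pvMapping.foldl (fun tech p => pvAInner p.1 p.2 tech exif_data) PySem.Dict.empty).items

-- ===== PORT B =====
-- B's single scan of exif_data: for each item, record value for every matching mapping
-- entry whose tech_key was not seen before
def pvBScan (found : PySem.Dict String String) :
    List (String × String) → PySem.Dict String String
  | [] => found
  | (k, v) :: rest =>
      pvBScan
        (pvMapping.foldl
          (fun f q => if PySem.Str.isIn q.1 k && !(f.contains q.2) then f.insert q.2 v else f)
          found) rest

def classify_technical_info_py_alt (exif_data : List (String × String)) : List (String × String) :=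
  let found := pvBScan PySem.Dict.empty exif_data
  (pvMapping.foldl
    (fun out q => if found.contains q.2 then out.insert q.2 (found.getD q.2 "") else out)
    PySem.Dict.empty).items

-- ===== PRECONDITION & SPEC =====
def Spec_classify_technical_info_py (exif_data : List (String × String)) (out : List (String × String)) : Prop := out = classify_technical_info_py_alt exif_data
instance (exif_data : List (String × String)) (out : List (String × String)) : Decidable (Spec_classify_technical_info_py exif_data out) := by unfold Spec_classify_technical_info_py; infer_instance

-- ===== CLAIM (what is proved, stated in full; the proofs are below) =====
def Claim_equal_classify_technical_info_py : Prop := ∀ (exif_data : List (String × String)), Dom_classify_technical_info_py exif_data → Spec_classify_technical_info_py exif_data (classify_technical_info_py exif_data)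

-- ===== LEMMAS AND PROOFS =====

-- value of the first exif item whose key contains ek
def pvFirstMatch (ek : String) : List (String × String) → Option String
  | [] => none
  | (k, v) :: rest => if PySem.Str.isIn ek k then some v else pvFirstMatch ek rest

theorem pvAInner_eq (ek tk : String) (tech : PySem.Dict String String)
    (xs : List (String × String)) :
    pvAInner ek tk tech xs =
      match pvFirstMatch ek xs with
      | some v => tech.insert tk v
      | none => tech := by
  induction xs with
  | nil => rfl
  | cons p rest ih =>
      obtain ⟨k, v⟩ := p
      simp only [pvAInner, pvFirstMatch]
      split <;> simp [ih]

-- entries whose tech_key differs from tk do not affect lookup at tk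
theorem pvInnerFold_untouched (m : List (String × String)) (k v : String)
    (tk : String) (h : tk ∉ m.map Prod.snd) (f : PySem.Dict String String) :
    (m.foldl
      (fun f q => if PySem.Str.isIn q.1 k && !(f.contains q.2) then f.insert q.2 v else f)
      f).get? tk = f.get? tk := by
  induction m generalizing f with
  | nil => rfl
  | cons q m' ih =>
      simp only [List.map_cons, List.mem_cons, not_or] at h
      simp only [List.foldl_cons]
      rw [ih h.2]
      split
      · exact PySem.Dict.get?_insert_of_ne _ _ h.1
      · rfl

theorem pvInnerFold_get (m : List (String × String))
    (hm : (m.map Prod.snd).Nodup) (ek tk : String) (hmem : (ek, tk) ∈ m)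
    (f : PySem.Dict String String) (k v : String) :
    (m.foldl
      (fun f q => if PySem.Str.isIn q.1 k && !(f.contains q.2) then f.insert q.2 v else f)
      f).get? tk =
      if PySem.Str.isIn ek k && !(f.contains tk) then some v else f.get? tk := by
  induction m generalizing f with
  | nil => cases hmem
  | cons q m' ih =>
      simp only [List.map_cons, List.nodup_cons] at hm
      simp only [List.foldl_cons]
      rcases List.mem_cons.mp hmem with rfl | hmem'
      · -- head is (ek, tk); the rest of the fold leaves tk untouched
        rw [pvInnerFold_untouched _ _ _ _ hm.1]
        split
        · exact PySem.Dict.get?_insert_self _ _ _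
        · rfl
      · -- head has a different tech_key
        have hne : q.2 ≠ tk := by
          intro he
          exact hm.1 (he ▸ (List.mem_map.mpr ⟨(ek, tk), hmem', rfl⟩))
        have hcont : ∀ g : PySem.Dict String String,
            (if PySem.Str.isIn q.1 k && !(g.contains q.2) then g.insert q.2 v else g).get? tk
              = g.get? tk := by
          intro g
          split
          · exact PySem.Dict.get?_insert_of_ne _ _ (Ne.symm hne)
          · rfl
        have hcont2 : (if PySem.Str.isIn q.1 k && !(f.contains q.2) then f.insert q.2 v
              else f).contains tk = f.contains tk := by
          split
          · rw [PySem.Dict.contains_insert]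
            simp [Ne.symm hne]
          · rfl
        rw [ih hm.2 hmem', hcont2, hcont f]

theorem pvBScan_get (ek tk : String) (hmem : (ek, tk) ∈ pvMapping)
    (f : PySem.Dict String String) (xs : List (String × String)) :
    (pvBScan f xs).get? tk = (f.get? tk).or (pvFirstMatch ek xs) := by
  induction xs generalizing f with
  | nil => cases h : f.get? tk <;> simp [pvBScan, pvFirstMatch, h]
  | cons p rest ih =>
      obtain ⟨k, v⟩ := p
      simp only [pvBScan, pvFirstMatch]
      rw [ih]
      rw [pvInnerFold_get pvMapping (by decide) ek tk hmem f k v]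
      rw [PySem.Dict.contains_eq_isSome_get?]
      cases h : f.get? tk with
      | some w => simp
      | none =>
          simp only [Option.isSome_none, Bool.not_false, Bool.and_true, Option.none_or]
          split <;> simp

-- ===== VERDICT (by name: the statement is the Claim_ definition above) =====
theorem classify_technical_info_py_spec : Claim_equal_classify_technical_info_py := by
  intro exif_data _
  unfold Spec_classify_technical_info_py
  unfold classify_technical_info_py classify_technical_info_py_alt
  congr 1
  apply PySem.List.foldl_congr_mem
  intro acc q hq
  rw [pvAInner_eq]
  have hget : (pvBScan PySem.Dict.empty exif_data).get? q.2 = pvFirstMatch q.1 exif_data := by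
    have := pvBScan_get q.1 q.2 (by simpa using hq) PySem.Dict.empty exif_data
    simpa [PySem.Dict.get?_empty] using this
  rw [PySem.Dict.contains_eq_isSome_get?, hget,
      PySem.Dict.getD_eq_get?_getD, hget]
  cases hFM : pvFirstMatch q.1 exif_data <;> simp
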